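-- pv_equiv track=rewrite | github.com/pypi-data/pypi-mirror-404 | packages/codecrate/codecrate-0.1.1.tar.gz/codecrate-0.1.1/tests/test_patch_apply_roundtrip.py | _extract_diff_blocks
-- ===== SOURCE A (Python) =====
-- def _extract_diff_blocks(md_text: str) -> str:
--     lines = md_text.splitlines()
--     out: list[str] = []
--     i = 0
--     while i < len(lines):
--         if lines[i].strip() == "```diff":
--             i += 1
--             while i < len(lines) and lines[i].strip() != "```":
--                 out.append(lines[i])
--                 i += 1
--         i += 1
--     return "\n".join(out) + "\n"
-- ===== SOURCE B (Python) =====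
-- def _extract_diff_blocks(md_text: str) -> str:
--     def go(lines):
--         stripped = [l.strip() for l in lines]
--         if "```diff" not in stripped:
--             return []
--         start = stripped.index("```diff")
--         rest = lines[start + 1:]
--         rstr = stripped[start + 1:]
--         if "```" not in rstr:
--             return rest
--         end = rstr.index("```")
--         return rest[:end] + go(rest[end + 1:])
--     return "\n".join(go(md_text.splitlines())) + "\n"
-- ===== Notes on version B (the rewrite author's own statement) =====
-- stated objective: alternative
-- what changed: Replaced the index-driven nested while loops by a marker-search decomposition: recursively locate the next '```diff' fence with list.index on a pre-stripped list, slice out the block up to the next '```' fence, and recurse on the remainder.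
import Mathlib
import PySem

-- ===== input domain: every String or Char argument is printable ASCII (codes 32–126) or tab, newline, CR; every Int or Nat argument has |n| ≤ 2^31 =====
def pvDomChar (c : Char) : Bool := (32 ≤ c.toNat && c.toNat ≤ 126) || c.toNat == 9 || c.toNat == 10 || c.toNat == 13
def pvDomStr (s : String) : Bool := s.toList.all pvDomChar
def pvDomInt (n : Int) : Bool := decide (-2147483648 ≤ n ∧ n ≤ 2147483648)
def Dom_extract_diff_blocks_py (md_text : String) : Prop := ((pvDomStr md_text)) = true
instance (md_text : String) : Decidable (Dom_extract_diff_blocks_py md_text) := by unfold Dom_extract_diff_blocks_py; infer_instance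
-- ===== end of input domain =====

-- B replaces A's nested index-driven while loops by a recursive marker-search decomposition (find next fence with list.index on a pre-stripped list, slice, recurse); objective: alternative.


-- ===== PORT A =====
-- inner while loop: 'while i < len(lines) and lines[i].strip() != "```": out.append(lines[i]); i += 1'
-- (fuel bounds the remaining iterations; fuel ≥ len(lines) - i makes it exact)
def extractInnerA (lines : List String) : Nat → Nat → List String → Nat × List String
  | 0, i, out => (i, out)
  | fuel + 1, i, out =>
    if h : i < lines.length then
      if PySem.Str.strip lines[i] ≠ "```" then
        extractInnerA lines fuel (i + 1) (out ++ [lines[i]])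
      else (i, out)
    else (i, out)

-- outer while loop: 'while i < len(lines): if lines[i].strip() == "```diff": …inner…; i += 1'
def extractOuterA (lines : List String) : Nat → Nat → List String → List String
  | 0, _, out => out
  | fuel + 1, i, out =>
    if h : i < lines.length then
      if PySem.Str.strip lines[i] = "```diff" then
        let r := extractInnerA lines lines.length (i + 1) out
        extractOuterA lines fuel (r.1 + 1) r.2
      else extractOuterA lines fuel (i + 1) out
    else out

def extract_diff_blocks_py (md_text : String) : String :=
  let lines := PySem.Str.splitlines md_text
  PySem.Str.join "\n" (extractOuterA lines lines.length 0 []) ++ "\n"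

-- ===== PORT B =====
-- Source B's 'go': find the first '```diff' line via list.index on the pre-stripped list,
-- slice past it, cut at the next '```' (list.index again), recurse on the remainder.
-- Python slices with nonnegative bounds 'xs[k:]' / 'xs[:k]' are ported as List.drop / List.take (exact there).
def extractGoB (lines : List String) : List String :=
  match hs : PySem.List.index? (lines.map PySem.Str.strip) "```diff" with
  | none => []
  | some start =>
    match PySem.List.index? ((lines.map PySem.Str.strip).drop (start + 1)) "```" with
    | none => lines.drop (start + 1)
    | some e =>
      (lines.drop (start + 1)).take e ++ extractGoB ((lines.drop (start + 1)).drop (e + 1))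
termination_by lines.length
decreasing_by
  have hmem : "```diff" ∈ lines.map PySem.Str.strip :=
    (PySem.List.index?_isSome_iff _ _).mp (by rw [hs]; rfl)
  have : lines ≠ [] := by rintro rfl; simp at hmem
  have hlen : 0 < lines.length := List.length_pos_iff.mpr this
  simp [List.length_drop]; omega

def extract_diff_blocks_py_alt (md_text : String) : String :=
  PySem.Str.join "\n" (extractGoB (PySem.Str.splitlines md_text)) ++ "\n"

-- ===== PRECONDITION & SPEC =====
def Spec_extract_diff_blocks_py (md_text : String) (out : String) : Prop := out = extract_diff_blocks_py_alt md_text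
instance (md_text : String) (out : String) : Decidable (Spec_extract_diff_blocks_py md_text out) := by unfold Spec_extract_diff_blocks_py; infer_instance

-- ===== CLAIM (what is proved, stated in full; the proofs are below) =====
def Claim_equal_extract_diff_blocks_py : Prop := ∀ (md_text : String), Dom_extract_diff_blocks_py md_text → Spec_extract_diff_blocks_py md_text (extract_diff_blocks_py md_text)

-- ===== LEMMAS AND PROOFS =====

-- reference state machine both ports are proved equal to
mutual
def specF : List String → List String
  | [] => []
  | x :: xs => if PySem.Str.strip x = "```diff" then specIn xs else specF xs
def specIn : List String → List String
  | [] => []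
  | x :: xs => if PySem.Str.strip x = "```" then specF xs else x :: specIn xs
end

theorem innerA_spec (lines : List String) (fuel : Nat) :
    ∀ i out, lines.length ≤ i + fuel →
    (extractInnerA lines fuel i out).2 ++
      specF (lines.drop ((extractInnerA lines fuel i out).1 + 1)) =
    out ++ specIn (lines.drop i) := by
  induction fuel with
  | zero =>
      intro i out hle
      rw [extractInnerA]
      simp [List.drop_eq_nil_of_le (by omega : lines.length ≤ i),
            List.drop_eq_nil_of_le (by omega : lines.length ≤ i + 1), specF, specIn]
  | succ fuel ih =>
      intro i out hle
      by_cases h : i < lines.length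
      · rw [extractInnerA, dif_pos h]
        rw [List.drop_eq_getElem_cons h, specIn]
        by_cases hne : PySem.Str.strip lines[i] ≠ "```"
        · rw [if_pos hne, if_neg (by intro hc; exact hne hc)]
          rw [ih (i + 1) (out ++ [lines[i]]) (by omega)]
          simp
        · have heq : PySem.Str.strip lines[i] = "```" := by by_contra hc; exact hne hc
          rw [if_neg hne, if_pos heq]
      · rw [extractInnerA, dif_neg h]
        simp [List.drop_eq_nil_of_le (by omega : lines.length ≤ i),
              List.drop_eq_nil_of_le (by omega : lines.length ≤ i + 1), specF, specIn]

theorem innerA_ge (lines : List String) (fuel : Nat) :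
    ∀ i out, i ≤ (extractInnerA lines fuel i out).1 := by
  induction fuel with
  | zero => intro i out; rfl
  | succ fuel ih =>
      intro i out
      rw [extractInnerA]
      split_ifs with h hne
      · have := ih (i + 1) (out ++ [lines[i]]); omega
      · rfl
      · rfl

theorem outerA_spec (lines : List String) (fuel : Nat) :
    ∀ i out, lines.length ≤ i + fuel →
    extractOuterA lines fuel i out = out ++ specF (lines.drop i) := by
  induction fuel with
  | zero =>
      intro i out hle
      rw [extractOuterA]
      simp [List.drop_eq_nil_of_le (by omega : lines.length ≤ i), specF]
  | succ fuel ih =>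
      intro i out hle
      by_cases h : i < lines.length
      · rw [extractOuterA, dif_pos h]
        rw [List.drop_eq_getElem_cons h, specF]
        by_cases heq : PySem.Str.strip lines[i] = "```diff"
        · rw [if_pos heq, if_pos heq]
          have hge := innerA_ge lines lines.length (i + 1) out
          rw [ih _ _ (by omega)]
          exact innerA_spec lines lines.length (i + 1) out (by omega)
        · rw [if_neg heq, if_neg heq]
          exact ih (i + 1) out (by omega)
      · rw [extractOuterA, dif_neg h]
        simp [List.drop_eq_nil_of_le (by omega : lines.length ≤ i), specF]

theorem specF_no_diff (lines : List String)
    (hnm : "```diff" ∉ lines.map PySem.Str.strip) : specF lines = [] := by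
  induction lines with
  | nil => rfl
  | cons x xs ih =>
      simp only [List.map_cons, List.mem_cons, not_or] at hnm
      rw [specF, if_neg (fun hc => hnm.1 hc.symm)]
      exact ih hnm.2

theorem specIn_no_close (l : List String)
    (hnm : "```" ∉ l.map PySem.Str.strip) : specIn l = l := by
  induction l with
  | nil => rfl
  | cons x xs ih =>
      simp only [List.map_cons, List.mem_cons, not_or] at hnm
      rw [specIn, if_neg (fun hc => hnm.1 hc.symm)]
      rw [ih hnm.2]

theorem specF_skip (lines : List String) :
    ∀ start, PySem.List.index? (lines.map PySem.Str.strip) "```diff" = some start →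
    specF lines = specIn (lines.drop (start + 1)) := by
  induction lines with
  | nil => intro start h; simp [PySem.List.index?_eq_idxOf?] at h
  | cons x xs ih =>
      intro start h
      by_cases hx : PySem.Str.strip x = "```diff"
      · rw [List.map_cons, hx, PySem.List.index?_cons_self] at h
        obtain rfl : (0 : Nat) = start := by injection h
        rw [specF, if_pos hx]
        simp
      · rw [List.map_cons, PySem.List.index?_cons_of_ne (xs.map PySem.Str.strip) hx] at h
        match hk : PySem.List.index? (xs.map PySem.Str.strip) "```diff" with
        | none => rw [hk] at h; simp at h
        | some k =>
            rw [hk] at h; simp at h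
            rw [specF, if_neg hx, ih k hk, ← h]
            rfl

theorem specIn_take (l : List String) :
    ∀ e, PySem.List.index? (l.map PySem.Str.strip) "```" = some e →
    specIn l = l.take e ++ specF (l.drop (e + 1)) := by
  induction l with
  | nil => intro e h; simp [PySem.List.index?_eq_idxOf?] at h
  | cons x xs ih =>
      intro e h
      by_cases hx : PySem.Str.strip x = "```"
      · rw [List.map_cons, hx, PySem.List.index?_cons_self] at h
        obtain rfl : (0 : Nat) = e := by injection h
        rw [specIn, if_pos hx]
        simp
      · rw [List.map_cons, PySem.List.index?_cons_of_ne (xs.map PySem.Str.strip) hx] at h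
        match hk : PySem.List.index? (xs.map PySem.Str.strip) "```" with
        | none => rw [hk] at h; simp at h
        | some k =>
            rw [hk] at h; simp at h
            rw [specIn, if_neg hx, ih k hk, ← h]
            rfl

theorem goB_nonempty_of_some (lines : List String) (start : Nat)
    (hs : PySem.List.index? (lines.map PySem.Str.strip) "```diff" = some start) :
    0 < lines.length := by
  have hmem : "```diff" ∈ lines.map PySem.Str.strip :=
    (PySem.List.index?_isSome_iff _ _).mp (by rw [hs]; rfl)
  rcases lines with _ | ⟨x, xs⟩
  · simp at hmem
  · simp

theorem goB_eq_specF (lines : List String) : extractGoB lines = specF lines := by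
  induction hn : lines.length using Nat.strong_induction_on generalizing lines with
  | _ n ih =>
    subst hn
    rw [extractGoB.eq_def]
    split
    · next hs => exact (specF_no_diff _ ((PySem.List.index?_eq_none_iff _ _).mp hs)).symm
    · next start hs =>
      split
      · next he =>
        rw [specF_skip lines start hs]
        exact (specIn_no_close _ (by
          rw [← List.map_drop] at he
          exact (PySem.List.index?_eq_none_iff _ _).mp he)).symm
      · next e he =>
        rw [specF_skip lines start hs,
            specIn_take _ e (by rwa [← List.map_drop] at he)]
        congr 1
        have hpos := goB_nonempty_of_some lines start hs
        exact ih ((lines.drop (start + 1)).drop (e + 1)).length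
          (by simp [List.length_drop]; omega) _ rfl

-- ===== VERDICT (by name: the statement is the Claim_ definition above) =====
theorem extract_diff_blocks_py_spec : Claim_equal_extract_diff_blocks_py := by
  intro md_text _
  show PySem.Str.join "\n" (extractOuterA (PySem.Str.splitlines md_text) (PySem.Str.splitlines md_text).length 0 []) ++ "\n" =
    PySem.Str.join "\n" (extractGoB (PySem.Str.splitlines md_text)) ++ "\n"
  rw [outerA_spec _ _ 0 [] (by omega), goB_eq_specF]
  simp
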